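-- pv_equiv track=rewrite | github.com/AdamSuski/ochrona-danych | lab6/rsa.py | text_to_numbers
-- ===== SOURCE A (Python) =====
-- def text_to_numbers(text: str, block_size: int) -> list:
--     text_blocks = [text[i:i + block_size] for i in range(0, len(text), block_size)]
--     result = []
--     for block in text_blocks:
--         encoded_block = []
--         for num in block.encode():
--             encoded_block.append(num if (100 <= num < 900) else 999 - num)
--         block_to_number = int(''.join(str(i) for i in encoded_block))
--         result.append(block_to_number)
--     return result
-- ===== SOURCE B (Python) =====
-- def text_to_numbers(text: str, block_size: int) -> list:
--     digits = ''.join(str(num if 100 <= num < 900 else 999 - num) for num in text.encode())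
--     width = 3 * block_size
--     return [int(digits[i:i + width]) for i in range(0, len(digits), width)]
-- ===== Notes on version B (the rewrite author's own statement) =====
-- stated objective: alternative
-- what changed: B translates the whole text in one flat pass into a single digit string (three digits per byte) and then slices that string into 3*block_size-character chunks, instead of A's per-block pipeline of text slicing, per-byte list building, join and int; correctness rests on every transformed byte printing as exactly three digits.
import Mathlib
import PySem

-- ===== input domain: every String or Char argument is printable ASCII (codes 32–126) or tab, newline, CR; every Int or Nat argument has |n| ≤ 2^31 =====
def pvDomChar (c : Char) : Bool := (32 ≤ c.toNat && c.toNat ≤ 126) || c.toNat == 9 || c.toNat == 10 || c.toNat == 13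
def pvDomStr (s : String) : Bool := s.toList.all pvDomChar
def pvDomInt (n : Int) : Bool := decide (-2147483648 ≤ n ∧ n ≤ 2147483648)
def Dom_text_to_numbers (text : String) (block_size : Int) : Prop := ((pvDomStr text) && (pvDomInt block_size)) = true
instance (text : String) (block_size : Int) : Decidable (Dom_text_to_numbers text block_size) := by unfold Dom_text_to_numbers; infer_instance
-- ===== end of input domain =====

-- B builds one flat three-digits-per-byte string for the whole text in a single pass and slices
-- it into 3*block_size-character chunks, replacing A's per-block slice/encode/join/int pipeline
-- (alternative decomposition, same asymptotic cost).


-- ===== PORT A =====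
-- 'block.encode()' iterates over the bytes of the block; on the ASCII domain Dom these are exactly
-- the char codes, ported as c.toNat (exact there). ''.join(str(i) for i in ...) is ported on
-- List Char (PySem.Int.toChars + flatten); int(s) is PySem.Int.ofChars?, which never fails here
-- (every block is nonempty and all digits), so the .getD 0 default is unreachable.
def text_to_numbers (text : String) (block_size : Int) : List Int :=
  let cs := text.toList
  let text_blocks := (PySem.List.pyRange 0 (PySem.List.len cs) block_size).map
    (fun i => PySem.List.slice cs (some i) (some (i + block_size)))
  text_blocks.foldl (fun result block =>
    let encoded_block := block.foldl (fun eb c =>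
      let num : Int := c.toNat
      eb ++ [if 100 ≤ num ∧ num < 900 then num else 999 - num]) []
    let joined := (encoded_block.map PySem.Int.toChars).flatten
    result ++ [(PySem.Int.ofChars? joined).getD 0]) []

-- ===== PORT B =====
-- 'text.encode()' bytes = char codes on Dom; str(...) and ''.join on List Char; int = ofChars?
-- (.getD 0 unreachable: every chunk is nonempty and all digits).
def text_to_numbers_alt (text : String) (block_size : Int) : List Int :=
  let digits := (text.toList.map (fun c =>
    let num : Int := c.toNat
    PySem.Int.toChars (if 100 ≤ num ∧ num < 900 then num else 999 - num))).flatten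
  let width := 3 * block_size
  (PySem.List.pyRange 0 (PySem.List.len digits) width).map
    (fun i => (PySem.Int.ofChars? (PySem.List.slice digits (some i) (some (i + width)))).getD 0)

-- ===== PRECONDITION & SPEC =====
-- Pre_ excludes only block_size = 0, where both Pythons raise ValueError (range() with step 0).
def Pre_text_to_numbers (text : String) (block_size : Int) : Prop := block_size ≠ 0
instance (text : String) (block_size : Int) : Decidable (Pre_text_to_numbers text block_size) := by unfold Pre_text_to_numbers; infer_instance
def pvWitness_text_to_numbers : String × Int := ("ab", 1)
def Spec_text_to_numbers (text : String) (block_size : Int) (out : List Int) : Prop := out = text_to_numbers_alt text block_size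
instance (text : String) (block_size : Int) (out : List Int) : Decidable (Spec_text_to_numbers text block_size out) := by unfold Spec_text_to_numbers; infer_instance

-- ===== CLAIM (what is proved, stated in full; the proofs are below) =====
def Claim_equal_text_to_numbers : Prop := ∀ (text : String) (block_size : Int), Dom_text_to_numbers text block_size → Pre_text_to_numbers text block_size → Spec_text_to_numbers text block_size (text_to_numbers text block_size)

-- ===== LEMMAS AND PROOFS =====

def pvEnc (c : Char) : List Char :=
  PySem.Int.toChars (if 100 ≤ (c.toNat : Int) ∧ (c.toNat : Int) < 900 then (c.toNat : Int) else 999 - (c.toNat : Int))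

theorem pvEnc_len_aux : ∀ m : Nat, m < 127 →
    (PySem.Int.toChars (if 100 ≤ (m : Int) ∧ (m : Int) < 900 then (m : Int) else 999 - (m : Int))).length = 3 := by
  decide

theorem pvEnc_len (c : Char) (h : pvDomChar c = true) : (pvEnc c).length = 3 := by
  have hm : c.toNat < 127 := by simp [pvDomChar] at h; omega
  exact pvEnc_len_aux c.toNat hm

theorem foldl_append_map {α β : Type} (F : α → β) (l : List α) (init : List β) :
    l.foldl (fun r x => r ++ [F x]) init = init ++ l.map F := by
  induction l generalizing init with
  | nil => simp
  | cons x xs ih => simp [ih]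

theorem drop3 (k : Nat) (l : List Char) (h : ∀ c ∈ l, (pvEnc c).length = 3) :
    ((l.map pvEnc).flatten).drop (3 * k) = ((l.drop k).map pvEnc).flatten := by
  induction k generalizing l with
  | zero => simp
  | succ k ih =>
    cases l with
    | nil => simp
    | cons c t =>
      have hc : (pvEnc c).length = 3 := h c (by simp)
      have e : 3 * (k + 1) = 3 + 3 * k := by omega
      simp only [List.map_cons, List.flatten_cons, e, List.drop_append, List.drop_succ_cons, hc]
      have e2 : (pvEnc c).drop (3 + 3 * k) = [] := List.drop_eq_nil_of_le (by omega)
      rw [e2]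
      simpa using ih t (fun x hx => h x (by simp [hx]))

theorem take3 (k : Nat) (l : List Char) (h : ∀ c ∈ l, (pvEnc c).length = 3) :
    ((l.map pvEnc).flatten).take (3 * k) = ((l.take k).map pvEnc).flatten := by
  induction k generalizing l with
  | zero => simp
  | succ k ih =>
    cases l with
    | nil => simp
    | cons c t =>
      have hc : (pvEnc c).length = 3 := h c (by simp)
      have e : 3 * (k + 1) = 3 + 3 * k := by omega
      simp only [List.map_cons, List.flatten_cons, e, List.take_append, List.take_succ_cons, hc]
      have e2 : (pvEnc c).take (3 + 3 * k) = pvEnc c := List.take_of_length_le (by omega)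
      rw [e2]
      simp [ih t (fun x hx => h x (by simp [hx]))]

theorem count3 (n b : Nat) (hb : 1 ≤ b) : (3 * n + 3 * b - 1) / (3 * b) = (n + b - 1) / b := by
  set q := (n + b - 1) / b with hq
  have h1 : b * q ≤ n + b - 1 := by rw [Nat.mul_comm]; exact Nat.div_mul_le_self _ _
  have h2 : n + b - 1 < (q + 1) * b :=
    (Nat.div_lt_iff_lt_mul (by omega : 0 < b)).1 (show (n + b - 1) / b < q + 1 by omega)
  apply Nat.div_eq_of_lt_le
  · calc q * (3 * b) = 3 * (b * q) := by ring
      _ ≤ 3 * n + 3 * b - 1 := by omega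
  · calc 3 * n + 3 * b - 1 < 3 * ((q + 1) * b) := by omega
      _ = (q + 1) * (3 * b) := by ring

theorem flat_len (l : List Char) (h : ∀ c ∈ l, (pvEnc c).length = 3) :
    ((l.map pvEnc).flatten).length = 3 * l.length := by
  induction l with
  | nil => simp
  | cons c t ih =>
    have hc := h c (by simp)
    simp [hc, ih (fun x hx => h x (by simp [hx]))]
    omega

theorem pyRange_neg_empty (stop s : Int) (hs : s < 0) (hstop : 0 ≤ stop) :
    PySem.List.pyRange 0 stop s = [] := by
  simp [PySem.List.pyRange]
  intro _
  rw [if_neg (by omega), if_neg (by omega)]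

theorem countInt (n' b' : Nat) (hb : 1 ≤ b') :
    (if (0:Int) < ((3 * n' : Nat) : Int) then ((((3 * n' : Nat) : Int) - 0 + 3 * (b' : Int) - 1) / (3 * (b' : Int))).toNat else 0)
    = (if (0:Int) < ((n' : Nat) : Int) then ((((n' : Nat) : Int) - 0 + (b' : Int) - 1) / ((b' : Int))).toNat else 0) := by
  rcases Nat.eq_zero_or_pos n' with h | h
  · simp [h]
  · rw [if_pos (by exact_mod_cast (by omega : 0 < 3 * n')), if_pos (by exact_mod_cast h)]
    have e1 : ((3 * n' : Nat) : Int) - 0 + 3 * (b' : Int) - 1 = ((3 * n' + 3 * b' - 1 : Nat) : Int) := by omega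
    have e2 : ((n' : Nat) : Int) - 0 + (b' : Int) - 1 = ((n' + b' - 1 : Nat) : Int) := by omega
    have e3 : 3 * (b' : Int) = ((3 * b' : Nat) : Int) := by omega
    rw [e1, e2, e3, Int.ofNat_ediv_ofNat, Int.ofNat_ediv_ofNat, count3 n' b' hb]

theorem perblock (l : List Char) (hall : ∀ c ∈ l, (pvEnc c).length = 3) (b' k : Nat) :
    PySem.List.slice ((l.map pvEnc).flatten) (some ((3 * b' * k : Nat) : Int))
      (some (((3 * b' * k : Nat) : Int) + ((3 * b' : Nat) : Int)))
    = ((PySem.List.slice l (some ((b' * k : Nat) : Int))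
        (some (((b' * k : Nat) : Int) + ((b' : Nat) : Int)))).map pvEnc).flatten := by
  rw [PySem.List.slice_natCast_add, PySem.List.slice_natCast_add]
  have e : 3 * b' * k = 3 * (b' * k) := by ring
  rw [e, drop3 _ _ hall]
  exact take3 b' _ (fun c hc => hall c (List.mem_of_mem_drop hc))

theorem main_thm : ∀ (text : String) (block_size : Int), Dom_text_to_numbers text block_size →
    block_size ≠ 0 → text_to_numbers text block_size = text_to_numbers_alt text block_size := by
  intro text b hdom hb
  have hall : ∀ c ∈ text.toList, (pvEnc c).length = 3 := by
    intro c hc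
    apply pvEnc_len
    simp [Dom_text_to_numbers, pvDomStr, List.all_eq_true] at hdom
    exact hdom.1 c hc
  set cs := text.toList with hcs
  rcases lt_or_gt_of_ne hb with hneg | hpos
  · -- negative block size: both ranges are empty
    have h1 : ∀ L : List Char, PySem.List.pyRange 0 (PySem.List.len L) b = [] := fun L =>
      pyRange_neg_empty _ _ hneg (by simp)
    have h2 : ∀ L : List Char, PySem.List.pyRange 0 (PySem.List.len L) (3 * b) = [] := fun L =>
      pyRange_neg_empty _ _ (by omega) (by simp)
    simp only [text_to_numbers, text_to_numbers_alt, h1, h2]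
    simp
  · simp only [text_to_numbers, text_to_numbers_alt, foldl_append_map, List.nil_append,
      List.map_map, PySem.List.len_eq]
    have hg1 : (PySem.Int.toChars ∘ fun x : Char =>
        if 100 ≤ (x.toNat : Int) ∧ (x.toNat : Int) < 900 then (x.toNat : Int) else 999 - (x.toNat : Int)) = pvEnc := rfl
    have hg2 : (fun c : Char =>
        PySem.Int.toChars (if 100 ≤ (c.toNat : Int) ∧ (c.toNat : Int) < 900 then (c.toNat : Int) else 999 - (c.toNat : Int))) = pvEnc := rfl
    rw [hg1, hg2, flat_len _ hall, ← hcs]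
    obtain ⟨b', hb'⟩ : ∃ b' : Nat, b = (b' : Int) := ⟨b.toNat, (Int.toNat_of_nonneg (by omega)).symm⟩
    have hb1 : 1 ≤ b' := by omega
    have h3b : (3 : Int) * (b' : Int) = ((3 * b' : Nat) : Int) := by push_cast; ring
    rw [hb', PySem.List.pyRange_of_pos _ _ (by exact_mod_cast hb1),
        PySem.List.pyRange_of_pos _ _ (by omega : (0:Int) < 3 * (b' : Int))]
    rw [countInt cs.length b' hb1]
    rw [List.map_map, List.map_map]
    apply List.map_congr_left
    intro k _
    simp only [Function.comp]
    have i1 : (0:Int) + (b' : Int) * (k : Int) = ((b' * k : Nat) : Int) := by push_cast; ring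
    have i2 : (0:Int) + 3 * (b' : Int) * (k : Int) = ((3 * b' * k : Nat) : Int) := by push_cast; ring
    rw [i1, i2, h3b, perblock cs hall b' k]

-- ===== VERDICT (by name: the statement is the Claim_ definition above) =====
theorem text_to_numbers_spec : Claim_equal_text_to_numbers := by
  intro text block_size hdom hpre
  unfold Spec_text_to_numbers
  exact main_thm text block_size hdom hpre
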